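-- pv_equiv track=rewrite | github.com/ephrhr/LeetcodePy | Solutions/2140.solving-questions-with-brainpower.py | mostPoints
-- ===== SOURCE A (Python) =====
-- from typing import List
--
-- def mostPoints(questions: List[List[int]]) -> int:
--     n = len(questions)
--     memo = [q[0] for q in questions]
--     for i in range(n - 2, -1, -1):
--         if i + questions[i][1] + 1 < n:
--             memo[i] += memo[i + questions[i][1] + 1]
--         memo[i] = max(memo[i], memo[i + 1])
--     return memo[0]
-- ===== SOURCE B (Python) =====
-- def mostPoints(questions):
--     # Forward push-DP over a prefix scan: avail[k] banks the best score of a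
--     # chain of solved questions whose cooldown ends by slot k (0 = start fresh);
--     # a chain whose cooldown runs past the end is a candidate answer.
--     n = len(questions)
--     avail = [0] * (n + 1)
--     best_done = None
--     for i, (p, b, *_) in enumerate(questions):
--         score = p + avail[i]
--         j = i + b + 1
--         if j >= n:
--             best_done = score if best_done is None else max(best_done, score)
--         else:
--             avail[j] = max(avail[j], score)
--         if avail[i + 1] < avail[i]:
--             avail[i + 1] = avail[i]
--     return best_done
-- ===== Notes on version B (the rewrite author's own statement) =====
-- stated objective: alternative
-- what changed: Replaces the backward suffix pull-DP (memo[i] pulled from memo[i+b+1], scanning right-to-left) with a forward prefix push-DP: a single left-to-right scan that banks each finished chain's score at the slot where its cooldown ends, carries the best bank forward, and collects the answer from chains whose cooldown runs past the end.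
-- outside the precondition, e.g. on mostPoints([[5]]): A returns 5, B raises ValueError; on mostPoints([[1, 2], [5, -1]]): A returns 5, B returns 1
import Mathlib
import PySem

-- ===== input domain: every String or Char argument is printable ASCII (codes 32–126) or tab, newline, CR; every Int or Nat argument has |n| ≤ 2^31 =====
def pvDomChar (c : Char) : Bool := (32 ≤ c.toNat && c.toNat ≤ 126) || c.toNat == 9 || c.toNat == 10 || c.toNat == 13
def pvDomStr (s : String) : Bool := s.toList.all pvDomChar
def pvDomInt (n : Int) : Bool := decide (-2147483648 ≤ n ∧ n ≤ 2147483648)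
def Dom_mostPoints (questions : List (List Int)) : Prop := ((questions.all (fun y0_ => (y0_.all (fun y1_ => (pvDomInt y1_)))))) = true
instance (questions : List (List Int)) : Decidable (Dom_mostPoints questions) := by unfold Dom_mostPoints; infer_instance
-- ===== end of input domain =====

-- B replaces A's backward suffix pull-DP (memo[i] pulled from memo[i+b+1]) by a forward
-- prefix push-DP: a single front-to-back scan that banks the score of each finished chain
-- at the slot where its cooldown ends and carries the best bank forward; the answer is
-- collected from chains whose cooldown runs past the end.  Same cost, different traversal
-- (objective: alternative).

-- ===== PORT A =====
def mostPointsStep (questions : List (List Int)) (n : Int) (memo : List Int) (i : Int) : List Int :=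
  let memo :=
    if i + PySem.List.pyGetD (PySem.List.pyGetD questions i []) 1 0 + 1 < n then
      PySem.List.pySetD memo i (PySem.List.pyGetD memo i 0 +
        PySem.List.pyGetD memo (i + PySem.List.pyGetD (PySem.List.pyGetD questions i []) 1 0 + 1) 0)
    else memo
  PySem.List.pySetD memo i (max (PySem.List.pyGetD memo i 0) (PySem.List.pyGetD memo (i + 1) 0))

def mostPoints (questions : List (List Int)) : Int :=
  let n : Int := questions.length
  let memo : List Int := questions.map (fun q => PySem.List.pyGetD q 0 0)
  PySem.List.pyGetD ((PySem.List.pyRange (n - 2) (-1) (-1)).foldl (mostPointsStep questions n) memo) 0 0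

-- ===== PORT B =====
def mostPointsAltStep (n : Int) (st : List Int × Option Int) (iq : Int × List Int) : List Int × Option Int :=
  let i := iq.1
  let q := iq.2
  -- '(p, b, *_)' unpack: exact when q has at least two entries (Pre_); Python raises ValueError otherwise
  let p := PySem.List.pyGetD q 0 0
  let b := PySem.List.pyGetD q 1 0
  let score := p + PySem.List.pyGetD st.1 i 0
  let j := i + b + 1
  let best := if n ≤ j then some ((st.2).elim score (fun bd => max bd score)) else st.2
  let avail := if n ≤ j then st.1
    else PySem.List.pySetD st.1 j (max (PySem.List.pyGetD st.1 j 0) score)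
  let avail := if PySem.List.pyGetD avail (i + 1) 0 < PySem.List.pyGetD avail i 0 then
      PySem.List.pySetD avail (i + 1) (PySem.List.pyGetD avail i 0)
    else avail
  (avail, best)

def mostPoints_alt (questions : List (List Int)) : Int :=
  let n : Int := questions.length
  let res := (PySem.List.enumerate questions).foldl (mostPointsAltStep n)
    (List.replicate (questions.length + 1) 0, none)
  -- Python returns best_done, which is None only when no cooldown passes the end —
  -- impossible under Pre_ (nonempty list, nonnegative brainpower); 0 stands in for None
  (res.2).getD 0

-- ===== PRECONDITION & SPEC =====
-- Pre_ restricts to the problem's natural domain: a NONEMPTY list of questions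
-- [points, brainpower, ...], each at least two entries long with NONNEGATIVE brainpower.
-- Outside it Python A raises IndexError (empty list, a too-short non-final question, a very
-- negative brainpower), or A still returns while B's own algorithm cannot follow: B reads
-- every question's brainpower, so on a one-entry final question (which A never reads) B
-- raises ValueError, and on a negative brainpower A's value comes from Python's
-- negative-index wraparound into its half-updated memo, an accident of its representation.
def Pre_mostPoints (questions : List (List Int)) : Prop :=
  questions ≠ [] ∧ ∀ q ∈ questions, 2 ≤ q.length ∧ 0 ≤ q.getD 1 0
instance (questions : List (List Int)) : Decidable (Pre_mostPoints questions) := by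
  unfold Pre_mostPoints; infer_instance

def pvWitness_mostPoints : List (List Int) := [[3, 2], [4, 3], [4, 4], [2, 5]]

def Spec_mostPoints (questions : List (List Int)) (out : Int) : Prop := out = mostPoints_alt questions
instance (questions : List (List Int)) (out : Int) : Decidable (Spec_mostPoints questions out) := by
  unfold Spec_mostPoints; infer_instance

-- ===== CLAIM (what is proved, stated in full; the proofs are below) =====
def Claim_equal_mostPoints : Prop := ∀ (questions : List (List Int)), Dom_mostPoints questions → Pre_mostPoints questions → Spec_mostPoints questions (mostPoints questions)

-- ===== LEMMAS AND PROOFS =====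

-- q[0] and q[1] as the ports read them
def pvH0 (q : List Int) : Int := PySem.List.pyGetD q 0 0
def pvB (q : List Int) : Int := PySem.List.pyGetD q 1 0

-- the common specification: A's memo value for a (nonempty) suffix of the question list
def pvVal : List (List Int) → Int
  | [] => 0
  | q :: t =>
    if t = [] then pvH0 q
    else max (pvH0 q +
      (if (pvB q).toNat < t.length then pvVal (t.drop (pvB q).toNat) else 0)) (pvVal t)
  termination_by qs => qs.length
  decreasing_by
  · simp
  · exact Nat.lt_succ_self _

theorem pvVal_sing (q : List Int) : pvVal [q] = pvH0 q := by
  rw [pvVal]; simp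

theorem pvVal_cons (q : List Int) (t : List (List Int)) (ht : t ≠ []) :
    pvVal (q :: t) = max (pvH0 q +
      (if (pvB q).toNat < t.length then pvVal (t.drop (pvB q).toNat) else 0)) (pvVal t) := by
  rw [pvVal, if_neg ht]

-- the list [pvVal qs, pvVal qs.tail, …, pvVal [last]]
def pvSuffs : List (List Int) → List Int
  | [] => []
  | q :: t => pvVal (q :: t) :: pvSuffs t

theorem pvSuffs_length (qs : List (List Int)) : (pvSuffs qs).length = qs.length := by
  induction qs with
  | nil => rfl
  | cons q t ih => simp [pvSuffs, ih]

theorem pvSuffs_getD (qs : List (List Int)) (j : Nat) (h : j < qs.length) :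
    (pvSuffs qs).getD j 0 = pvVal (qs.drop j) := by
  induction qs generalizing j with
  | nil => simp at h
  | cons q t ih =>
    cases j with
    | zero => simp [pvSuffs]
    | succ j => simpa [pvSuffs] using ih j (by simpa using h)

theorem pvSuffs_getElem (qs : List (List Int)) (j : Nat) (h : j < (pvSuffs qs).length) :
    (pvSuffs qs)[j] = pvVal (qs.drop j) := by
  have h' : j < qs.length := by simpa [pvSuffs_length] using h
  have := pvSuffs_getD qs j h'
  simpa [List.getD_eq_getElem?_getD, List.getElem?_eq_getElem h] using this

-- A-side: the loop invariant state after having processed indices down to k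
def pvS (qs : List (List Int)) (k : Nat) : List Int :=
  (qs.take k).map pvH0 ++ pvSuffs (qs.drop k)

theorem a_step (qs : List (List Int)) (k : Nat) (hk : k + 1 < qs.length)
    (hb : ∀ q ∈ qs.dropLast, 0 ≤ pvB q) :
    mostPointsStep qs (qs.length : Int) (pvS qs (k + 1)) (k : Int) = pvS qs k := by
  have hk' : k < qs.length := by omega
  have hbk : 0 ≤ pvB qs[k] := by
    have hmem : qs[k] ∈ qs.dropLast := by
      have h : qs.dropLast[k]'(by simp [List.length_dropLast]; omega) = qs[k] :=
        List.getElem_dropLast _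
      exact h ▸ List.getElem_mem _
    exact hb _ hmem
  have hAlen : ((qs.take k).map pvH0).length = k := by
    simp [List.length_take]; omega
  have hM : pvS qs (k + 1) = (qs.take k).map pvH0 ++ pvH0 qs[k] :: pvSuffs (qs.drop (k + 1)) := by
    unfold pvS
    rw [List.take_add_one, List.getElem?_eq_getElem hk']
    show ((qs.take k ++ [qs[k]]).map pvH0) ++ _ = _
    rw [List.map_append, List.append_assoc]
    rfl
  set A : List Int := (qs.take k).map pvH0 with hA
  set S : List Int := pvSuffs (qs.drop (k + 1)) with hS
  have hSlen : S.length = qs.length - (k + 1) := by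
    rw [hS, pvSuffs_length, List.length_drop]
  have hdd : ∀ m : Nat, (qs.drop (k + 1)).drop m = qs.drop (k + 1 + m) := by
    intro m
    rw [List.drop_drop]
  have hmid : ∀ (x : Int), PySem.List.pyGetD (A ++ x :: S) (k : Int) 0 = x := by
    intro x
    rw [PySem.List.pyGetD_natCast]
    simp [List.getD_eq_getElem?_getD, hAlen]
  have hjump : ∀ (x : Int) (m : Nat), k + 1 + m < qs.length →
      PySem.List.pyGetD (A ++ x :: S) ((k + 1 + m : Nat) : Int) 0 = pvVal (qs.drop (k + 1 + m)) := by
    intro x m hm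
    rw [PySem.List.pyGetD_natCast]
    have h1 : A.length ≤ k + 1 + m := by omega
    have h2 : m < S.length := by omega
    rw [List.getD_eq_getElem?_getD, List.getElem?_append_right h1, hAlen]
    have h3 : k + 1 + m - k = m + 1 := by omega
    rw [h3]
    rw [List.getElem?_cons_succ, List.getElem?_eq_getElem h2]
    rw [Option.getD_some]
    exact (pvSuffs_getElem _ m (by simpa [hS, pvSuffs_length] using h2)).trans
      (congrArg pvVal (hdd m))
  have hset : ∀ (x y : Int), (A ++ x :: S).set k y = A ++ y :: S := by
    intro x y
    conv_lhs => rw [← hAlen]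
    simp
  have hRHS : pvS qs k = A ++ pvVal (qs.drop k) :: S := by
    unfold pvS
    rw [← List.getElem_cons_drop hk']
    show A ++ pvSuffs (qs[k] :: qs.drop (k + 1)) = _
    rw [show pvSuffs (qs[k] :: qs.drop (k + 1)) = pvVal (qs[k] :: qs.drop (k + 1)) :: S from rfl]
  have hq : PySem.List.pyGetD qs (k : Int) [] = qs[k] := PySem.List.pyGetD_ofNat qs k [] hk'
  have htne : qs.drop (k + 1) ≠ [] := by
    apply List.ne_nil_of_length_pos
    simp [List.length_drop]; omega
  have hval : pvVal (qs.drop k) =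
      max (pvH0 qs[k] +
        (if (pvB qs[k]).toNat < (qs.drop (k + 1)).length then
          pvVal (qs.drop (k + 1 + (pvB qs[k]).toNat)) else 0)) (pvVal (qs.drop (k + 1))) := by
    conv_lhs => rw [← List.getElem_cons_drop hk', pvVal_cons qs[k] (qs.drop (k + 1)) htne]
    rw [hdd]
  rw [hM, hRHS]
  show PySem.List.pySetD
      (if ((k : Int) + PySem.List.pyGetD (PySem.List.pyGetD qs (k : Int) []) 1 0 + 1 < (qs.length : Int)) then
        PySem.List.pySetD (A ++ pvH0 qs[k] :: S) (k : Int)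
          (PySem.List.pyGetD (A ++ pvH0 qs[k] :: S) (k : Int) 0 +
           PySem.List.pyGetD (A ++ pvH0 qs[k] :: S)
             ((k : Int) + PySem.List.pyGetD (PySem.List.pyGetD qs (k : Int) []) 1 0 + 1) 0)
      else A ++ pvH0 qs[k] :: S) (k : Int)
      (max
        (PySem.List.pyGetD
          (if ((k : Int) + PySem.List.pyGetD (PySem.List.pyGetD qs (k : Int) []) 1 0 + 1 < (qs.length : Int)) then
            PySem.List.pySetD (A ++ pvH0 qs[k] :: S) (k : Int)
              (PySem.List.pyGetD (A ++ pvH0 qs[k] :: S) (k : Int) 0 +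
               PySem.List.pyGetD (A ++ pvH0 qs[k] :: S)
                 ((k : Int) + PySem.List.pyGetD (PySem.List.pyGetD qs (k : Int) []) 1 0 + 1) 0)
          else A ++ pvH0 qs[k] :: S) (k : Int) 0)
        (PySem.List.pyGetD
          (if ((k : Int) + PySem.List.pyGetD (PySem.List.pyGetD qs (k : Int) []) 1 0 + 1 < (qs.length : Int)) then
            PySem.List.pySetD (A ++ pvH0 qs[k] :: S) (k : Int)
              (PySem.List.pyGetD (A ++ pvH0 qs[k] :: S) (k : Int) 0 +
               PySem.List.pyGetD (A ++ pvH0 qs[k] :: S)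
                 ((k : Int) + PySem.List.pyGetD (PySem.List.pyGetD qs (k : Int) []) 1 0 + 1) 0)
          else A ++ pvH0 qs[k] :: S) ((k : Int) + 1) 0))
    = A ++ pvVal (qs.drop k) :: S
  rw [hq]
  rw [show PySem.List.pyGetD qs[k] 1 0 = pvB qs[k] from rfl]
  by_cases hC : (k : Int) + pvB qs[k] + 1 < (qs.length : Int)
  · have hbn : ((pvB qs[k]).toNat : Int) = pvB qs[k] := Int.toNat_of_nonneg hbk
    have hidx : (k : Int) + pvB qs[k] + 1 = ((k + 1 + (pvB qs[k]).toNat : Nat) : Int) := by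
      push_cast [hbn]; ring
    have hlt : k + 1 + (pvB qs[k]).toNat < qs.length := by
      have := hC; rw [hidx] at this; exact_mod_cast this
    have hmemo' : PySem.List.pySetD (A ++ pvH0 qs[k] :: S) (k : Int)
        (PySem.List.pyGetD (A ++ pvH0 qs[k] :: S) (k : Int) 0 +
         PySem.List.pyGetD (A ++ pvH0 qs[k] :: S) ((k : Int) + pvB qs[k] + 1) 0)
        = A ++ (pvH0 qs[k] + pvVal (qs.drop (k + 1 + (pvB qs[k]).toNat))) :: S := by
      rw [hmid, hidx, hjump _ _ hlt, PySem.List.pySetD_natCast, hset]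
    rw [if_pos hC, hmemo']
    rw [hmid]
    rw [show ((k : Int) + 1) = ((k + 1 + 0 : Nat) : Int) by push_cast; ring]
    rw [hjump _ 0 (by omega)]
    rw [PySem.List.pySetD_natCast, hset, hval,
      if_pos (show (pvB qs[k]).toNat < (qs.drop (k + 1)).length by
        simp only [List.length_drop]; omega)]
  · rw [if_neg hC, hmid]
    rw [show ((k : Int) + 1) = ((k + 1 + 0 : Nat) : Int) by push_cast; ring]
    rw [hjump _ 0 (by omega)]
    rw [PySem.List.pySetD_natCast]
    rw [hset]
    rw [hval,
      if_neg (show ¬ (pvB qs[k]).toNat < (qs.drop (k + 1)).length by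
        simp only [List.length_drop]; omega)]
    norm_num

theorem a_loop (qs : List (List Int)) (k : Nat) (hk : k + 1 ≤ qs.length)
    (hb : ∀ q ∈ qs.dropLast, 0 ≤ pvB q) :
    (PySem.List.pyRange ((k : Int) - 1) (-1) (-1)).foldl
      (mostPointsStep qs (qs.length : Int)) (pvS qs k) = pvS qs 0 := by
  induction k with
  | zero =>
    rw [PySem.List.pyRange_neg_one_eq_nil (by norm_num)]
    rfl
  | succ k ih =>
    rw [show ((k + 1 : Nat) : Int) - 1 = (k : Nat) by push_cast; ring]
    rw [PySem.List.pyRange_neg_one_cons (by omega)]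
    rw [List.foldl_cons]
    rw [a_step qs k (by omega) hb]
    exact ih (by omega)

theorem a_eq_pvVal (qs : List (List Int)) (hq : qs ≠ [])
    (hb : ∀ q ∈ qs.dropLast, 0 ≤ pvB q) :
    mostPoints qs = pvVal qs := by
  have hn : 1 ≤ qs.length := List.length_pos_iff.mpr hq
  have hdrop : qs.drop (qs.length - 1) = [qs[qs.length - 1]'(by omega)] := by
    rw [← List.getElem_cons_drop (by omega)]
    rw [show qs.length - 1 + 1 = qs.length by omega, List.drop_length]
  have hsplit : qs = qs.take (qs.length - 1) ++ [qs[qs.length - 1]'(by omega)] := by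
    conv_lhs => rw [← List.take_length (l := qs), show qs.length = (qs.length - 1) + 1 by omega,
      List.take_add_one, List.getElem?_eq_getElem (by omega)]
    simp
  have hmemo0 : qs.map pvH0 = pvS qs (qs.length - 1) := by
    unfold pvS
    rw [hdrop]
    conv_lhs => rw [hsplit]
    rw [List.map_append]
    have : pvSuffs [qs[qs.length - 1]'(by omega)] = [pvH0 (qs[qs.length - 1]'(by omega))] := by
      show [pvVal [qs[qs.length - 1]'(by omega)]] = _
      rw [pvVal_sing]
    rw [this]
    rfl
  show PySem.List.pyGetD
      ((PySem.List.pyRange ((qs.length : Int) - 2) (-1) (-1)).foldl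
        (mostPointsStep qs (qs.length : Int)) (qs.map (fun q => PySem.List.pyGetD q 0 0))) 0 0
    = pvVal qs
  rw [show qs.map (fun q => PySem.List.pyGetD q 0 0) = qs.map pvH0 from rfl, hmemo0]
  rw [show (qs.length : Int) - 2 = (((qs.length - 1 : Nat) : Int)) - 1 by push_cast [hn]; ring]
  rw [a_loop qs (qs.length - 1) (by omega) hb]
  obtain ⟨q, t, rfl⟩ := List.exists_cons_of_ne_nil hq
  show PySem.List.pyGetD (pvSuffs (q :: t)) 0 0 = pvVal (q :: t)
  rw [show pvSuffs (q :: t) = pvVal (q :: t) :: pvSuffs t from rfl]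
  exact PySem.List.pyGetD_zero_cons _ _ _

-- ===== B-side lemmas =====

-- optional max: pvOptMax o x = the max of x and o's content, as an Option (B's best_done update)
def pvOptMax (o : Option Int) (x : Int) : Option Int := some (o.elim x (fun y => max y x))

theorem pvOptMax_comm (o : Option Int) (x y : Int) :
    pvOptMax (pvOptMax o x) y = pvOptMax (pvOptMax o y) x := by
  cases o <;> simp [pvOptMax] <;> omega

theorem pvOptMax_max (o : Option Int) (a b : Int) :
    pvOptMax o (max a b) = pvOptMax (pvOptMax o a) b := by
  cases o <;> simp [pvOptMax, max_assoc]

-- Φ: the best completed answer reachable from state (f, bd) once the scan has reached slot i: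
-- the max of bd and, over each future slot k, the banked score f k plus the best terminal
-- chain of the suffix from k
def pvPhi (qs : List (List Int)) (f : Nat → Int) (bd : Option Int) (i : Nat) : Option Int :=
  if _h : i < qs.length then pvOptMax (pvPhi qs f bd (i + 1)) (f i + pvVal (qs.drop i)) else bd
  termination_by qs.length - i

theorem pvPhi_stop (qs : List (List Int)) (f : Nat → Int) (bd : Option Int) (i : Nat)
    (h : ¬ i < qs.length) : pvPhi qs f bd i = bd := by
  rw [pvPhi, dif_neg h]

theorem pvPhi_peel (qs : List (List Int)) (f : Nat → Int) (bd : Option Int) (i : Nat)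
    (h : i < qs.length) :
    pvPhi qs f bd i = pvOptMax (pvPhi qs f bd (i + 1)) (f i + pvVal (qs.drop i)) := by
  rw [pvPhi, dif_pos h]

theorem pvPhi_init (qs : List (List Int)) (f : Nat → Int) (bd : Option Int) (x : Int) :
    ∀ i, pvPhi qs f (pvOptMax bd x) i = pvOptMax (pvPhi qs f bd i) x := by
  have key : ∀ (c i : Nat), qs.length - i ≤ c →
      pvPhi qs f (pvOptMax bd x) i = pvOptMax (pvPhi qs f bd i) x := by
    intro c
    induction c with
    | zero =>
      intro i hc
      have h : ¬ i < qs.length := by omega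
      rw [pvPhi_stop _ _ _ _ h, pvPhi_stop _ _ _ _ h]
    | succ c ih =>
      intro i hc
      by_cases h : i < qs.length
      · rw [pvPhi_peel _ _ _ _ h, pvPhi_peel _ f bd _ h, ih (i + 1) (by omega), pvOptMax_comm]
      · rw [pvPhi_stop _ _ _ _ h, pvPhi_stop _ _ _ _ h]
  exact fun i => key (qs.length - i) i le_rfl

theorem pvPhi_congr (qs : List (List Int)) (f g : Nat → Int) (bd : Option Int)
    (i : Nat) (hfg : ∀ k, i ≤ k → k < qs.length → f k = g k) :
    pvPhi qs f bd i = pvPhi qs g bd i := by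
  have key : ∀ (c i : Nat), qs.length - i ≤ c →
      (∀ k, i ≤ k → k < qs.length → f k = g k) →
      pvPhi qs f bd i = pvPhi qs g bd i := by
    intro c
    induction c with
    | zero =>
      intro i hc _
      have h : ¬ i < qs.length := by omega
      rw [pvPhi_stop _ _ _ _ h, pvPhi_stop _ _ _ _ h]
    | succ c ih =>
      intro i hc hh
      by_cases h : i < qs.length
      · rw [pvPhi_peel _ _ _ _ h, pvPhi_peel _ g _ _ h,
          ih (i + 1) (by omega) (fun k hk1 hk2 => hh k (by omega) hk2), hh i le_rfl h]
      · rw [pvPhi_stop _ _ _ _ h, pvPhi_stop _ _ _ _ h]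
  exact key (qs.length - i) i le_rfl hfg

-- bumping one future slot k0 to max (f k0) x raises Φ by the candidate x + V k0
theorem pvPhi_update (qs : List (List Int)) (f g : Nat → Int) (bd : Option Int)
    (i k0 : Nat) (x : Int) (hik : i ≤ k0) (hk : k0 < qs.length)
    (hg0 : g k0 = max (f k0) x) (hg : ∀ k, k ≠ k0 → g k = f k) :
    pvPhi qs g bd i = pvOptMax (pvPhi qs f bd i) (x + pvVal (qs.drop k0)) := by
  have key : ∀ (c i : Nat), qs.length - i ≤ c → i ≤ k0 →
      pvPhi qs g bd i = pvOptMax (pvPhi qs f bd i) (x + pvVal (qs.drop k0)) := by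
    intro c
    induction c with
    | zero =>
      intro i hc hik
      omega
    | succ c ih =>
      intro i hc hik
      have h : i < qs.length := by omega
      by_cases he : i = k0
      · subst he
        rw [pvPhi_peel _ _ _ _ h, pvPhi_peel _ f _ _ h]
        rw [pvPhi_congr qs g f bd (i + 1) (fun k hk1 _ => hg k (by omega))]
        rw [hg0, show max (f i) x + pvVal (qs.drop i)
          = max (f i + pvVal (qs.drop i)) (x + pvVal (qs.drop i)) by omega]
        rw [pvOptMax_max]
      · have hik' : i + 1 ≤ k0 := by omega
        rw [pvPhi_peel _ _ _ _ h, pvPhi_peel _ f _ _ h, ih (i + 1) (by omega) hik',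
          hg i he, pvOptMax_comm]
  exact key (qs.length - i) i le_rfl hik

theorem pvVal_drop_antitone (qs : List (List Int)) (i : Nat) (h : i + 1 < qs.length) :
    pvVal (qs.drop (i + 1)) ≤ pvVal (qs.drop i) := by
  have hi : i < qs.length := by omega
  have htne : qs.drop (i + 1) ≠ [] := by
    apply List.ne_nil_of_length_pos
    simp [List.length_drop]; omega
  rw [← List.getElem_cons_drop hi, pvVal_cons _ _ htne]
  exact le_max_right _ _

theorem pvPhi_zeros (qs : List (List Int)) (i : Nat) (h : i < qs.length) :
    pvPhi qs (fun _ => 0) none i = some (pvVal (qs.drop i)) := by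
  have key : ∀ (c i : Nat), qs.length - i ≤ c → i < qs.length →
      pvPhi qs (fun _ => 0) none i = some (pvVal (qs.drop i)) := by
    intro c
    induction c with
    | zero =>
      intro i hc hi
      omega
    | succ c ih =>
      intro i hc hi
      rw [pvPhi_peel _ _ _ _ hi]
      by_cases h1 : i + 1 < qs.length
      · rw [ih (i + 1) (by omega) h1]
        have := pvVal_drop_antitone qs i h1
        simp [pvOptMax]
        omega
      · rw [pvPhi_stop _ _ _ _ h1]
        simp [pvOptMax]
  exact key (qs.length - i) i le_rfl h

theorem getD_set_self (l : List Int) (m : Nat) (x : Int) (h : m < l.length) :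
    (l.set m x).getD m 0 = x := by
  simp [List.getD_eq_getElem?_getD, h]

theorem getD_set_ne (l : List Int) (m k : Nat) (x : Int) (h : k ≠ m) :
    (l.set m x).getD k 0 = l.getD k 0 := by
  simp [List.getD_eq_getElem?_getD, Ne.symm h]

-- one B-iteration preserves Φ (read at the next slot)
theorem b_step (qs : List (List Int)) (i : Nat) (hi : i < qs.length)
    (_hq2 : 2 ≤ qs[i].length) (hb : 0 ≤ pvB qs[i])
    (avail : List Int) (hlen : avail.length = qs.length + 1) (bd : Option Int) :
    (mostPointsAltStep (qs.length : Int) (avail, bd) ((i : Int), qs[i])).1.length = qs.length + 1 ∧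
    pvPhi qs (fun k => (mostPointsAltStep (qs.length : Int) (avail, bd) ((i : Int), qs[i])).1.getD k 0)
      (mostPointsAltStep (qs.length : Int) (avail, bd) ((i : Int), qs[i])).2 (i + 1)
    = pvPhi qs (fun k => avail.getD k 0) bd i := by
  have hbn : ((pvB qs[i]).toNat : Int) = pvB qs[i] := Int.toNat_of_nonneg hb
  set bn : Nat := (pvB qs[i]).toNat with hbndef
  have hj : (i : Int) + pvB qs[i] + 1 = ((i + bn + 1 : Nat) : Int) := by push_cast [hbn]; ring
  set f : Nat → Int := fun k => avail.getD k 0 with hf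
  have hfi : PySem.List.pyGetD avail (i : Int) 0 = f i := PySem.List.pyGetD_natCast _ _ _
  have htne : i + 1 < qs.length → qs.drop (i + 1) ≠ [] := by
    intro h
    apply List.ne_nil_of_length_pos
    simp [List.length_drop]; omega
  have hdd : (qs.drop (i + 1)).drop bn = qs.drop (i + 1 + bn) := List.drop_drop
  unfold mostPointsAltStep
  simp only []
  rw [show PySem.List.pyGetD qs[i] 0 0 = pvH0 qs[i] from rfl,
    show PySem.List.pyGetD qs[i] 1 0 = pvB qs[i] from rfl, hfi, hj]
  set score : Int := pvH0 qs[i] + f i with hscoredef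
  by_cases hC : (qs.length : Int) ≤ ((i + bn + 1 : Nat) : Int)
  · -- cooldown runs past the end: bd is bumped, only the carry touches avail
    have hCn : qs.length ≤ i + bn + 1 := by exact_mod_cast hC
    rw [if_pos hC, if_pos hC]
    rw [show ((i : Int) + 1) = ((i + 1 : Nat) : Int) by push_cast; ring]
    rw [PySem.List.pyGetD_natCast, PySem.List.pyGetD_natCast, PySem.List.pySetD_natCast]
    have hbd' : (some ((bd.elim score) fun bd => max bd score)) = pvOptMax bd score := rfl
    have hcarry : ∀ (av2 : List Int),
        (av2 = if avail.getD (i + 1) 0 < avail.getD i 0 then avail.set (i + 1) (f i) else avail) →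
        (av2.length = avail.length ∧
          av2.getD (i + 1) 0 = max (f (i + 1)) (f i) ∧
          ∀ k, k ≠ i + 1 → av2.getD k 0 = f k) := by
      intro av2 hav2
      by_cases hlt : avail.getD (i + 1) 0 < avail.getD i 0
      · rw [hav2, if_pos hlt]
        refine ⟨by simp, ?_, ?_⟩
        · rw [getD_set_self _ _ _ (by omega)]
          simp only [hf]
          omega
        · intro k hk
          exact getD_set_ne _ _ _ _ hk
      · rw [hav2, if_neg hlt]
        refine ⟨rfl, ?_, fun k _ => rfl⟩
        simp only [hf] at hlt ⊢
        omega
    obtain ⟨hl2, hg1, hg2⟩ := hcarry _ rfl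
    constructor
    · rw [hl2, hlen]
    · rw [hbd']
      by_cases h1 : i + 1 < qs.length
      · rw [pvPhi_update qs f _ (pvOptMax bd score) (i + 1) (i + 1) (f i) le_rfl h1 hg1 hg2]
        rw [pvPhi_init]
        rw [pvPhi_peel _ _ _ _ hi]
        rw [← List.getElem_cons_drop hi, pvVal_cons _ _ (htne h1)]
        rw [if_neg (show ¬ bn < (qs.drop (i + 1)).length by simp [List.length_drop]; omega)]
        rw [show f i + max (pvH0 qs[i] + 0) (pvVal (qs.drop (i + 1)))
          = max score (f i + pvVal (qs.drop (i + 1))) by omega]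
        rw [pvOptMax_max]
      · -- i is the last index: Φ(i+1) ignores avail
        have hstop : ¬ i + 1 < qs.length := h1
        rw [pvPhi_stop _ _ _ _ hstop]
        rw [pvPhi_peel _ _ _ _ hi]
        rw [pvPhi_stop _ _ _ _ hstop]
        have hdrop1 : qs.drop i = [qs[i]] := by
          rw [← List.getElem_cons_drop hi]
          have : qs.drop (i + 1) = [] := by
            apply List.eq_nil_of_length_eq_zero
            simp [List.length_drop]; omega
          rw [this]
        rw [hdrop1, pvVal_sing]
        cases bd <;> simp [pvOptMax] <;> omega
  · -- push into a future slot j = i+bn+1 < n, then carry into slot i+1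
    have hCn : i + bn + 1 < qs.length := by
      have h' : ((i + bn + 1 : Nat) : Int) < (qs.length : Int) := lt_of_not_ge hC
      exact_mod_cast h'
    rw [if_neg hC, if_neg hC]
    rw [PySem.List.pyGetD_natCast, PySem.List.pySetD_natCast]
    set avail1 : List Int := avail.set (i + bn + 1) (max (avail.getD (i + bn + 1) 0) score)
      with hav1
    have hl1 : avail1.length = avail.length := by simp [hav1]
    set f1 : Nat → Int := fun k => avail1.getD k 0 with hf1
    have hf1j : f1 (i + bn + 1) = max (f (i + bn + 1)) score := by
      rw [hf1, hav1]
      exact getD_set_self _ _ _ (by omega)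
    have hf1ne : ∀ k, k ≠ i + bn + 1 → f1 k = f k := by
      intro k hk
      exact getD_set_ne _ _ _ _ hk
    have hf1i : f1 i = f i := hf1ne i (by omega)
    rw [show ((i : Int) + 1) = ((i + 1 : Nat) : Int) by push_cast; ring]
    rw [PySem.List.pyGetD_natCast, PySem.List.pyGetD_natCast, PySem.List.pySetD_natCast]
    have hcarry : ∀ (av2 : List Int),
        (av2 = if avail1.getD (i + 1) 0 < avail1.getD i 0 then avail1.set (i + 1) (avail1.getD i 0) else avail1) →
        (av2.length = avail1.length ∧
          av2.getD (i + 1) 0 = max (f1 (i + 1)) (f1 i) ∧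
          ∀ k, k ≠ i + 1 → av2.getD k 0 = f1 k) := by
      intro av2 hav2
      by_cases hlt : avail1.getD (i + 1) 0 < avail1.getD i 0
      · rw [hav2, if_pos hlt]
        refine ⟨by simp, ?_, ?_⟩
        · rw [getD_set_self _ _ _ (by omega)]
          simp only [hf1]
          omega
        · intro k hk
          exact getD_set_ne _ _ _ _ hk
      · rw [hav2, if_neg hlt]
        refine ⟨rfl, ?_, fun k _ => rfl⟩
        simp only [hf1] at hlt ⊢
        omega
    obtain ⟨hl2, hg1, hg2⟩ := hcarry _ rfl
    constructor
    · rw [hl2, hl1, hlen]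
    · have h1 : i + 1 < qs.length := by omega
      rw [pvPhi_update qs f1 _ bd (i + 1) (i + 1) (f1 i) le_rfl h1 hg1 hg2]
      rw [pvPhi_update qs f f1 bd (i + 1) (i + bn + 1) score (by omega) hCn hf1j hf1ne]
      rw [hf1i]
      rw [pvPhi_peel _ _ _ _ hi]
      rw [← List.getElem_cons_drop hi, pvVal_cons _ _ (htne h1)]
      rw [if_pos (show bn < (qs.drop (i + 1)).length by simp [List.length_drop]; omega)]
      rw [hdd]
      rw [show i + 1 + bn = i + bn + 1 by omega]
      rw [show f i + max (pvH0 qs[i] + pvVal (qs.drop (i + bn + 1))) (pvVal (qs.drop (i + 1)))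
        = max (score + pvVal (qs.drop (i + bn + 1))) (f i + pvVal (qs.drop (i + 1))) by omega]
      rw [pvOptMax_max]

-- folding B's loop over the enumerated suffix yields Φ of the incoming state
theorem b_loop (qs : List (List Int)) (hpre : ∀ q ∈ qs, 2 ≤ q.length ∧ 0 ≤ q.getD 1 0) :
    ∀ (rest : List (List Int)) (i : Nat), rest = qs.drop i →
    ∀ (avail : List Int), avail.length = qs.length + 1 → ∀ (bd : Option Int),
    ((PySem.List.enumerate rest (i : Int)).foldl (mostPointsAltStep (qs.length : Int)) (avail, bd)).2
      = pvPhi qs (fun k => avail.getD k 0) bd i := by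
  intro rest
  induction rest with
  | nil =>
    intro i hrest avail hlen bd
    rw [PySem.List.enumerate_nil]
    rw [List.foldl_nil]
    rw [pvPhi_stop]
    have := congrArg List.length hrest
    simp [List.length_drop] at this
    omega
  | cons q t ih =>
    intro i hrest avail hlen bd
    have hi : i < qs.length := by
      by_contra h
      rw [List.drop_eq_nil_of_le (by omega)] at hrest
      exact List.cons_ne_nil q t hrest
    have hexp : qs.drop i = qs[i] :: qs.drop (i + 1) := List.getElem_cons_drop hi |>.symm
    rw [hexp] at hrest
    have hq : q = qs[i] := (List.cons.injEq _ _ _ _ ▸ hrest).1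
    have ht : t = qs.drop (i + 1) := (List.cons.injEq _ _ _ _ ▸ hrest).2
    rw [PySem.List.enumerate_cons, List.foldl_cons, hq]
    obtain ⟨hlen', hphi⟩ := b_step qs i hi (hpre qs[i] (List.getElem_mem hi)).1
      (by
        have h2 := (hpre qs[i] (List.getElem_mem hi)).1
        have hnn := (hpre qs[i] (List.getElem_mem hi)).2
        rw [pvB, PySem.List.pyGetD_eq_getElem qs[i] 0 (by norm_num)
          (by exact_mod_cast (by omega : (1 : Int) < ((qs[i]).length : Int)))]
        simpa [List.getElem?_eq_getElem (show 1 < (qs[i]).length by omega)] using hnn)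
      avail hlen bd
    have hcast : (i : Int) + 1 = ((i + 1 : Nat) : Int) := by push_cast; ring
    rw [hcast]
    rw [ih (i + 1) ht _ hlen' _]
    exact hphi

theorem alt_eq_pvVal (qs : List (List Int)) (hq : qs ≠ [])
    (hpre : ∀ q ∈ qs, 2 ≤ q.length ∧ 0 ≤ q.getD 1 0) :
    mostPoints_alt qs = pvVal qs := by
  have hn : 0 < qs.length := List.length_pos_iff.mpr hq
  unfold mostPoints_alt
  have h0 : ((0 : Nat) : Int) = (0 : Int) := rfl
  have := b_loop qs hpre qs 0 (by simp) (List.replicate (qs.length + 1) 0)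
    (by simp) none
  rw [h0] at this
  simp only []
  rw [this]
  rw [pvPhi_congr qs _ (fun _ => 0) none 0
    (by intro k _ _; simp [List.getD_eq_getElem?_getD])]
  rw [pvPhi_zeros qs 0 hn]
  rfl

-- ===== VERDICT (by name: the statement is the Claim_ definition above) =====
theorem mostPoints_spec : Claim_equal_mostPoints := by
  intro qs _ hpre
  obtain ⟨hne, hall⟩ := hpre
  have hb : ∀ q ∈ qs.dropLast, 0 ≤ pvB q := by
    intro q hq
    have hmem : q ∈ qs := (List.dropLast_sublist (l := qs)).mem hq
    have h1 := (hall q hmem).1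
    have h2 := (hall q hmem).2
    rw [pvB, PySem.List.pyGetD_eq_getElem q 0 (by norm_num)
      (by exact_mod_cast (by omega : (1 : Int) < (q.length : Int)))]
    simpa [List.getElem?_eq_getElem (show 1 < q.length by omega)] using h2
  show mostPoints qs = mostPoints_alt qs
  rw [a_eq_pvVal qs hne hb, alt_eq_pvVal qs hne hall]
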